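-- pv_equiv track=rewrite | github.com/Javert899/pm4py-mdl | pm4pymdl/visualization/mvp/gen_framework2/versions/util.py | get_activity_map_events_frequency
-- ===== SOURCE A (Python) =====
-- from collections import Counter
--
-- def get_activity_map_events_frequency(key, res):
--     activities = [x for x in res["acti_spec"] if x[0] == key]
--     activities_map = {}
--     for x in activities:
--         k = x[1]
--         if k not in activities_map:
--             activities_map[k] = Counter()
--         activities_map[k][x[2]] += res["acti_spec"][x]
--     for k in activities_map:
--         activities_map[k] = len(activities_map[k])
--     return activities_map
-- ===== SOURCE B (Python) =====
-- def _distinct(seq):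
--     # first-occurrence order, duplicates dropped
--     return list(dict.fromkeys(seq))
--
--
-- def get_activity_map_events_frequency(key, res):
--     # staged nested passes: filter once, then for each distinct activity
--     # (first-occurrence order) count its distinct attribute values directly
--     matching = [x for x in res["acti_spec"] if x[0] == key]
--     return {a: len(_distinct(x[2] for x in matching if x[1] == a))
--             for a in _distinct(x[1] for x in matching)}
-- ===== Notes on version B (the rewrite author's own statement) =====
-- stated objective: alternative
-- what changed: Replaces A's incremental dict-of-Counters maintenance (then a second loop replacing each Counter by its len) with staged passes: filter the matching entries once, list the distinct activities, and for each activity count its distinct attribute values by a direct nested comprehension; trades A's single-pass bookkeeping for a plainer two-stage shape that rescans the filtered list per activity.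
import Mathlib
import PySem

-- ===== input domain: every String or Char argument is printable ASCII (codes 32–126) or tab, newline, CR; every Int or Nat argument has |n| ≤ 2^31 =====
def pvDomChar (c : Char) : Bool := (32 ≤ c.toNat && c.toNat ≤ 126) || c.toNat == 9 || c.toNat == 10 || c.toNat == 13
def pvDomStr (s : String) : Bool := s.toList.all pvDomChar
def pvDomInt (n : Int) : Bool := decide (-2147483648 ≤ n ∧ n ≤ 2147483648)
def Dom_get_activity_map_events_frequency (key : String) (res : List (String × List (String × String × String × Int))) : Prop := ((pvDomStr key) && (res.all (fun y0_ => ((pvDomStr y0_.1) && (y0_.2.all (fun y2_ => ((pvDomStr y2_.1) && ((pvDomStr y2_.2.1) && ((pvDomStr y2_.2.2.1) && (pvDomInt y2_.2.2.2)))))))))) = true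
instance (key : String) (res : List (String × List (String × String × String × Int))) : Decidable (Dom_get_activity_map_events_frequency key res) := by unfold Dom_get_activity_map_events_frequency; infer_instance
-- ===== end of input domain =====

-- B replaces A's incremental dict-of-Counters bookkeeping by staged passes: filter the
-- matching entries once, then for each distinct activity count its distinct values directly.
-- res is a dict str -> dict[(str,str,str), int]; the inner dict is encoded as a list of 4-tuples
-- (duplicate 3-tuple keys collapse, last value wins — PySem.Dict.ofList models that).

-- ===== PORT A =====
def get_activity_map_events_frequency (key : String) (res : List (String × List (String × String × String × Int))) : List (String × Int) :=
  match (PySem.Dict.ofList res).get? "acti_spec" with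
  | none => []  -- KeyError 'acti_spec' (excluded by Pre_)
  | some spec0 =>
    -- the Python value res["acti_spec"] is the dict over the 3-tuple keys
    let spec : PySem.Dict (String × String × String) Int :=
      PySem.Dict.ofList (spec0.map (fun x => ((x.1, x.2.1, x.2.2.1), x.2.2.2)))
    -- [x for x in res["acti_spec"] if x[0] == key]  (iterating a dict = its keys)
    let activities := spec.keys.filter (fun x => x.1 == key)
    let activities_map := activities.foldl
      (fun (m : PySem.Dict String (PySem.Dict String Int)) x =>
        -- if k not in activities_map: activities_map[k] = Counter()
        let m' := if m.contains x.2.1 then m else m.insert x.2.1 PySem.Dict.empty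
        -- activities_map[k][x[2]] += res["acti_spec"][x]
        m'.modify x.2.1 PySem.Dict.empty (fun c => c.modify x.2.2 0 (· + spec.getD x 0)))
      PySem.Dict.empty
    -- for k in activities_map: activities_map[k] = len(activities_map[k])
    activities_map.items.map (fun p => (p.1, (p.2.size : Int)))

-- ===== PORT B =====
-- _distinct(seq) = list(dict.fromkeys(seq)): first-occurrence order, duplicates dropped
def pvDistinct {α : Type} [BEq α] (xs : List α) : List α := PySem.Set.ofList xs

def get_activity_map_events_frequency_alt (key : String) (res : List (String × List (String × String × String × Int))) : List (String × Int) :=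
  match (PySem.Dict.ofList res).get? "acti_spec" with
  | none => []  -- KeyError 'acti_spec' in B too (excluded by Pre_)
  | some spec0 =>
    -- matching = [x for x in res["acti_spec"] if x[0] == key]  (dict iteration = distinct keys)
    let matching :=
      (pvDistinct (spec0.map (fun x => (x.1, x.2.1, x.2.2.1)))).filter (fun x => x.1 == key)
    -- {a: len(_distinct(x[2] for x in matching if x[1] == a)) for a in _distinct(x[1] for x in matching)}
    (pvDistinct (matching.map (fun x => x.2.1))).map
      (fun a => (a, ((pvDistinct ((matching.filter (fun x => x.2.1 == a)).map (fun x => x.2.2))).length : Int)))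

-- ===== PRECONDITION & SPEC =====
-- Pre_ excludes only the inputs where A raises KeyError: no "acti_spec" entry in res.
def Pre_get_activity_map_events_frequency (key : String) (res : List (String × List (String × String × String × Int))) : Prop :=
  ((PySem.Dict.ofList res).get? "acti_spec").isSome = true
instance (key : String) (res : List (String × List (String × String × String × Int))) : Decidable (Pre_get_activity_map_events_frequency key res) := by unfold Pre_get_activity_map_events_frequency; infer_instance

def pvWitness_get_activity_map_events_frequency : String × (List (String × List (String × String × String × Int))) :=
  ("a", [("acti_spec", [("a", "x", "y", 1), ("a", "x", "z", 2), ("b", "x", "w", 5)])])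

def Spec_get_activity_map_events_frequency (key : String) (res : List (String × List (String × String × String × Int))) (out : List (String × Int)) : Prop := out = get_activity_map_events_frequency_alt key res
instance (key : String) (res : List (String × List (String × String × String × Int))) (out : List (String × Int)) : Decidable (Spec_get_activity_map_events_frequency key res out) := by unfold Spec_get_activity_map_events_frequency; infer_instance

-- ===== CLAIM (what is proved, stated in full; the proofs are below) =====
def Claim_equal_get_activity_map_events_frequency : Prop := ∀ (key : String) (res : List (String × List (String × String × String × Int))), Dom_get_activity_map_events_frequency key res → Pre_get_activity_map_events_frequency key res → Spec_get_activity_map_events_frequency key res (get_activity_map_events_frequency key res)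

-- ===== LEMMAS AND PROOFS =====

theorem pv_ofList_append (l : List ((String×String×String) × Int)) (p) :
    PySem.Dict.ofList (l ++ [p]) = (PySem.Dict.ofList l).insert p.1 p.2 := by
  show List.foldl _ _ (l ++ [p]) = _
  rw [List.foldl_append]; rfl

theorem pv_contains_iff {α : Type} [BEq α] [LawfulBEq α] (s : PySem.Set α) (x : α) :
    PySem.Set.contains s x = true ↔ x ∈ s := by
  simp [PySem.Set.contains]

theorem pv_add_mem {α : Type} [BEq α] [LawfulBEq α] (xs : List α) (x : α) (h : x ∈ xs) :
    PySem.Set.add (PySem.Set.ofList xs) x = PySem.Set.ofList xs := by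
  simp only [PySem.Set.add]
  rw [if_pos ((pv_contains_iff _ _).mpr ((PySem.Set.mem_ofList xs x).mpr h))]

theorem pv_add_not_mem {α : Type} [BEq α] [LawfulBEq α] (xs : List α) (x : α) (h : x ∉ xs) :
    PySem.Set.add (PySem.Set.ofList xs) x = PySem.Set.ofList xs ++ [x] := by
  simp only [PySem.Set.add]
  rw [if_neg (fun hc => h ((PySem.Set.mem_ofList xs x).mp ((pv_contains_iff _ _).mp hc)))]

theorem pv_keys_ofList (l : List ((String × String × String) × Int)) :
    (PySem.Dict.ofList l).keys = PySem.Set.ofList (l.map Prod.fst) := by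
  induction l using List.reverseRecOn with
  | nil => rfl
  | append_singleton l p ih =>
    rw [pv_ofList_append, List.map_append, List.map_singleton, PySem.Set.ofList_append_singleton, ← ih]
    by_cases h : (PySem.Dict.ofList l).contains p.1
    · rw [PySem.Dict.keys_insert_of_contains _ _ h, PySem.Set.add]
      have : PySem.Set.contains (PySem.Dict.ofList l).keys p.1 = true := by
        simpa [PySem.Set.contains, List.contains_iff] using (PySem.Dict.contains_iff_mem_keys _ _).mp h
      rw [this]; rfl
    · rw [PySem.Dict.keys_insert_of_not_contains _ _ (by simpa using h), PySem.Set.add]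
      have : PySem.Set.contains (PySem.Dict.ofList l).keys p.1 = false := by
        have := (PySem.Dict.contains_iff_mem_keys (PySem.Dict.ofList l) p.1)
        simp only [PySem.Set.contains, List.contains_iff]
        simp only [Bool.not_eq_true] at h
        simpa using fun hm => absurd (this.mpr hm) (by simp [h])
      rw [this]; rfl

theorem pv_fold_keys (spec : PySem.Dict (String × String × String) Int)
    (L : List (String × String × String)) :
    (L.foldl
      (fun (m : PySem.Dict String (PySem.Dict String Int)) x =>
        (if m.contains x.2.1 then m else m.insert x.2.1 PySem.Dict.empty).modify x.2.1 PySem.Dict.empty (fun c => c.modify x.2.2 0 (· + spec.getD x 0)))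
      PySem.Dict.empty).keys
    = PySem.Set.ofList (L.map (fun x => x.2.1)) := by
  induction L using List.reverseRecOn with
  | nil => rfl
  | append_singleton L t ih =>
    rw [List.foldl_append, List.foldl_cons, List.foldl_nil, List.map_append, List.map_singleton,
        PySem.Set.ofList_append_singleton]
    set m := L.foldl
      (fun (m : PySem.Dict String (PySem.Dict String Int)) x =>
        (if m.contains x.2.1 then m else m.insert x.2.1 PySem.Dict.empty).modify x.2.1 PySem.Dict.empty (fun c => c.modify x.2.2 0 (· + spec.getD x 0)))
      PySem.Dict.empty with hm
    show ((if m.contains t.2.1 then m else m.insert t.2.1 PySem.Dict.empty).modify t.2.1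
      PySem.Dict.empty (fun c => c.modify t.2.2 0 (· + spec.getD t 0))).keys = _
    by_cases h : m.contains t.2.1
    · rw [if_pos h, PySem.Dict.keys_modify, PySem.Dict.keys_insert_of_contains _ _ h, ih]
      have hmem : t.2.1 ∈ L.map (fun x => x.2.1) := by
        have := (PySem.Dict.contains_iff_mem_keys m t.2.1).mp h
        rw [ih] at this
        exact (PySem.Set.mem_ofList _ _).mp this
      rw [pv_add_mem _ _ hmem]
    · rw [if_neg h, PySem.Dict.keys_modify,
          PySem.Dict.keys_insert_of_contains _ _ (PySem.Dict.contains_insert_self m t.2.1 PySem.Dict.empty),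
          PySem.Dict.keys_insert_of_not_contains _ _ (by simpa using h), ih]
      have hmem : t.2.1 ∉ L.map (fun x => x.2.1) := by
        intro hmem
        exact h ((PySem.Dict.contains_iff_mem_keys m t.2.1).mpr (ih ▸ (PySem.Set.mem_ofList _ _).mpr hmem))
      rw [pv_add_not_mem _ _ hmem]

theorem pv_fold_inner (spec : PySem.Dict (String × String × String) Int)
    (L : List (String × String × String)) (c : String) :
    ((L.foldl
      (fun (m : PySem.Dict String (PySem.Dict String Int)) x =>
        (if m.contains x.2.1 then m else m.insert x.2.1 PySem.Dict.empty).modify x.2.1 PySem.Dict.empty (fun c => c.modify x.2.2 0 (· + spec.getD x 0)))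
      PySem.Dict.empty).getD c PySem.Dict.empty).keys
    = PySem.Set.ofList ((L.filter (fun x => x.2.1 == c)).map (fun x => x.2.2)) := by
  induction L using List.reverseRecOn with
  | nil => rfl
  | append_singleton L t ih =>
    rw [List.foldl_append, List.foldl_cons, List.foldl_nil, List.filter_append]
    set m := L.foldl
      (fun (m : PySem.Dict String (PySem.Dict String Int)) x =>
        (if m.contains x.2.1 then m else m.insert x.2.1 PySem.Dict.empty).modify x.2.1 PySem.Dict.empty (fun c => c.modify x.2.2 0 (· + spec.getD x 0)))
      PySem.Dict.empty with hm
    show (((if m.contains t.2.1 then m else m.insert t.2.1 PySem.Dict.empty).modify t.2.1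
      PySem.Dict.empty (fun c => c.modify t.2.2 0 (· + spec.getD t 0))).getD c PySem.Dict.empty).keys = _
    by_cases hc : t.2.1 = c
    · subst hc
      have hf : List.filter (fun x => x.2.1 == t.2.1) [t] = [t] := by simp
      rw [hf, List.map_append, List.map_singleton, PySem.Set.ofList_append_singleton,
          PySem.Dict.getD_modify_self]
      have hbase : (if m.contains t.2.1 then m else m.insert t.2.1 PySem.Dict.empty).getD t.2.1 PySem.Dict.empty
          = m.getD t.2.1 PySem.Dict.empty := by
        by_cases h : m.contains t.2.1
        · rw [if_pos h]
        · rw [if_neg h, PySem.Dict.getD_insert_self, PySem.Dict.getD_of_not_contains _ _ (by simpa using h)]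
      rw [hbase, PySem.Dict.keys_modify]
      by_cases hv : (m.getD t.2.1 PySem.Dict.empty).contains t.2.2
      · rw [PySem.Dict.keys_insert_of_contains _ _ hv, ih]
        have hmem : t.2.2 ∈ (L.filter (fun x => x.2.1 == t.2.1)).map (fun x => x.2.2) := by
          have := (PySem.Dict.contains_iff_mem_keys _ t.2.2).mp hv
          rw [ih] at this
          exact (PySem.Set.mem_ofList _ _).mp this
        rw [pv_add_mem _ _ hmem]
      · rw [PySem.Dict.keys_insert_of_not_contains _ _ (by simpa using hv), ih]
        have hmem : t.2.2 ∉ (L.filter (fun x => x.2.1 == t.2.1)).map (fun x => x.2.2) := by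
          intro hmem
          exact hv ((PySem.Dict.contains_iff_mem_keys _ t.2.2).mpr (ih ▸ (PySem.Set.mem_ofList _ _).mpr hmem))
        rw [pv_add_not_mem _ _ hmem]
    · have hf : List.filter (fun x => x.2.1 == c) [t] = [] := by simp [hc]
      rw [hf, List.append_nil, PySem.Dict.getD_modify_of_ne _ _ _ (Ne.symm hc)]
      have hbase : (if m.contains t.2.1 then m else m.insert t.2.1 PySem.Dict.empty).getD c PySem.Dict.empty
          = m.getD c PySem.Dict.empty := by
        by_cases h : m.contains t.2.1
        · rw [if_pos h]
        · rw [if_neg h, PySem.Dict.getD_insert_of_ne _ _ _ (Ne.symm hc)]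
      rw [hbase, ih]

theorem pv_items_map_view (d : PySem.Dict String (PySem.Dict String Int)) (hn : d.keys.Nodup)
    (f : PySem.Dict String Int → Int) :
    d.items.map (fun p => (p.1, f p.2)) = d.keys.map (fun c => (c, f (d.getD c PySem.Dict.empty))) := by
  show _ = (d.items.map Prod.fst).map _
  rw [List.map_map]
  apply List.map_congr_left
  intro p hp
  have : d.getD p.1 PySem.Dict.empty = p.2 :=
    PySem.Dict.getD_of_mem_items d (by simpa using hp) hn PySem.Dict.empty
  simp [Function.comp, this]

theorem pv_size_eq (d : PySem.Dict String Int) : d.size = d.keys.length := by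
  show d.items.length = (d.items.map Prod.fst).length
  simp

theorem pv_core (spec : PySem.Dict (String × String × String) Int)
    (L : List (String × String × String)) :
    (L.foldl
      (fun (m : PySem.Dict String (PySem.Dict String Int)) x =>
        (if m.contains x.2.1 then m else m.insert x.2.1 PySem.Dict.empty).modify x.2.1 PySem.Dict.empty (fun c => c.modify x.2.2 0 (· + spec.getD x 0)))
      PySem.Dict.empty).items.map (fun p => (p.1, (p.2.size : Int)))
    = (PySem.Set.ofList (L.map (fun x => x.2.1))).map
        (fun a => (a, ((PySem.Set.ofList ((L.filter (fun x => x.2.1 == a)).map (fun x => x.2.2))).length : Int))) := by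
  have hkeys := pv_fold_keys spec L
  have hn : (L.foldl
      (fun (m : PySem.Dict String (PySem.Dict String Int)) x =>
        (if m.contains x.2.1 then m else m.insert x.2.1 PySem.Dict.empty).modify x.2.1 PySem.Dict.empty (fun c => c.modify x.2.2 0 (· + spec.getD x 0)))
      PySem.Dict.empty).keys.Nodup := by
    rw [hkeys]; exact PySem.Set.nodup_ofList _
  rw [pv_items_map_view _ hn (fun d => (d.size : Int)), hkeys]
  apply List.map_congr_left
  intro c _
  refine Prod.ext rfl ?_
  show ((_ : PySem.Dict String Int).size : Int) = _
  rw [pv_size_eq, pv_fold_inner spec L c]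

-- ===== VERDICT (by name: the statement is the Claim_ definition above) =====
theorem get_activity_map_events_frequency_spec : Claim_equal_get_activity_map_events_frequency := by
  intro key res _ _
  unfold Spec_get_activity_map_events_frequency
  unfold get_activity_map_events_frequency get_activity_map_events_frequency_alt
  cases hspec : (PySem.Dict.ofList res).get? "acti_spec" with
  | none => rfl
  | some spec0 =>
    simp only [pvDistinct]
    rw [pv_keys_ofList, List.map_map]
    have hcomp : (Prod.fst ∘ fun x => ((x.1, x.2.1, x.2.2.1), x.2.2.2)) = (fun (x : String × String × String × Int) => (x.1, x.2.1, x.2.2.1)) := rfl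
    rw [hcomp]
    exact pv_core _ _
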